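-- pv_equiv track=rewrite | github.com/SoniaComp/Algorithm_Python_2021 | interview/sorting/fradulent_1.py | activityNotifications
-- ===== SOURCE A (Python) =====
-- from bisect import bisect_left
--
-- def activityNotifications(expenditure, d):
--     count = 0
--     check_list = sorted(expenditure[:d])
--     if d % 2 == 0:
--         for i, num in enumerate(expenditure[d:]):
--             mid = check_list[d//2:d//2+2]
--             if num >= sum(mid):
--                 count += 1
--             check_list.remove(expenditure[i])
--             idx = bisect_left(check_list, num)
--             check_list.insert(idx, num)
--     else:
--         for i, num in enumerate(expenditure[d:]):
--             mid = check_list[d//2]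
--             if num >= mid*2:
--                 count += 1
--             check_list.remove(expenditure[i])
--             idx = bisect_left(check_list, num)
--             check_list.insert(idx, num)
--     return count
-- ===== SOURCE B (Python) =====
-- def activityNotifications(expenditure, d):
--     # Recompute the sorted trailing window directly for each position instead of
--     # maintaining one incrementally with remove/bisect/insert.
--     count = 0
--     for i in range(d, len(expenditure)):
--         w = sorted(expenditure[i - d:i])
--         if d % 2 == 0:
--             threshold = sum(w[d // 2:d // 2 + 2])
--         else:
--             threshold = 2 * w[d // 2]
--         if expenditure[i] >= threshold:
--             count += 1
--     return count
-- ===== Notes on version B (the rewrite author's own statement) =====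
-- stated objective: simpler
-- what changed: B recomputes the sorted trailing window from scratch at each position (one sort per step over an index loop) instead of A's incremental maintenance of one sorted list via remove / bisect_left / insert over enumerate.
-- outside the precondition, e.g. on activityNotifications([3, 1], -1): A returns 0, B raises IndexError; on activityNotifications([], -5): A returns 0, B raises IndexError
import Mathlib
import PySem

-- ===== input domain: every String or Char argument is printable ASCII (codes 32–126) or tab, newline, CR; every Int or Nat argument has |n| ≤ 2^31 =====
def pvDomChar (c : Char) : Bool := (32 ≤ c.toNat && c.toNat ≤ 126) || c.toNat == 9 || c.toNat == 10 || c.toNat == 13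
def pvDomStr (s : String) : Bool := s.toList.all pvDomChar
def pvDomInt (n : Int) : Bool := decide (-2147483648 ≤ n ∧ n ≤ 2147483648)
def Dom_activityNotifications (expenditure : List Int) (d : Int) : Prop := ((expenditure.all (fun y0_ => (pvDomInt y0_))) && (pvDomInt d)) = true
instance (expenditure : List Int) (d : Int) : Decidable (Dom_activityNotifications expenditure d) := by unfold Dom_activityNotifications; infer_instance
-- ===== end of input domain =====

-- B recomputes the sorted trailing window from scratch at each position instead of
-- maintaining A's sorted list incrementally (simpler decomposition; not faster).

-- ===== PORT A =====
-- loop body of A's even-d branch: slice the two "middle" cells, test, remove the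
-- outgoing element (ValueError = none), bisect_left + insert the incoming one
def aStepEven (e : List Int) (d : Int) (st : Int × List Int) (p : Int × Int) : Option (Int × List Int) :=
  let mid := PySem.List.slice st.2 (some (PySem.Int.floordiv d 2)) (some (PySem.Int.floordiv d 2 + 2))
  let count := if p.2 ≥ mid.sum then st.1 + 1 else st.1
  (PySem.List.pyGet? e p.1).bind fun x =>
    (PySem.List.remove? st.2 x).map fun cl =>
      (count, PySem.List.insert cl ((PySem.List.bisectLeft cl p.2 : Nat) : Int) p.2)

-- loop body of A's odd-d branch: index the middle cell (IndexError = none), then as above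
def aStepOdd (e : List Int) (d : Int) (st : Int × List Int) (p : Int × Int) : Option (Int × List Int) :=
  (PySem.List.pyGet? st.2 (PySem.Int.floordiv d 2)).bind fun mid =>
    let count := if p.2 ≥ mid * 2 then st.1 + 1 else st.1
    (PySem.List.pyGet? e p.1).bind fun x =>
      (PySem.List.remove? st.2 x).map fun cl =>
        (count, PySem.List.insert cl ((PySem.List.bisectLeft cl p.2 : Nat) : Int) p.2)

def activityNotifications (expenditure : List Int) (d : Int) : Int :=
  let checkList := PySem.List.sorted (PySem.List.slice expenditure none (some d)) (fun x => x) false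
  let tail := PySem.List.slice expenditure (some d) none
  let res :=
    if PySem.Int.mod d 2 = 0 then
      (PySem.List.enumerate tail 0).foldl
        (fun st p => st.bind (fun s => aStepEven expenditure d s p)) (some ((0 : Int), checkList))
    else
      (PySem.List.enumerate tail 0).foldl
        (fun st p => st.bind (fun s => aStepOdd expenditure d s p)) (some ((0 : Int), checkList))
  match res with
  | some st => st.1
  | none => 0   -- none = the Python raised; excluded by Pre_

-- ===== PORT B =====
-- loop body of Source B: sort the window expenditure[i-d:i] afresh, compare against the threshold
-- (indexing w[d//2] is in range whenever the Python returns, so pyGetD is exact there)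
def altBody (e : List Int) (d : Int) (count : Int) (i : Int) : Int :=
  let w := PySem.List.sorted (PySem.List.slice e (some (i - d)) (some i)) (fun x => x) false
  let threshold :=
    if PySem.Int.mod d 2 = 0 then
      (PySem.List.slice w (some (PySem.Int.floordiv d 2)) (some (PySem.Int.floordiv d 2 + 2))).sum
    else
      2 * PySem.List.pyGetD w (PySem.Int.floordiv d 2) 0
  if PySem.List.pyGetD e i 0 ≥ threshold then count + 1 else count

def activityNotifications_alt (expenditure : List Int) (d : Int) : Int :=
  (PySem.List.pyRange d (expenditure.length : Int) 1).foldl (altBody expenditure d) 0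

-- ===== PRECONDITION & SPEC =====
-- Pre_ excludes non-positive d (except the trivial d = 0 on the empty list): for negative d
-- A's negative slice/wraparound indexing accidentally returns values while B raises IndexError,
-- and for d = 0 on a non-empty list A raises ValueError (remove from an empty window).
def Pre_activityNotifications (expenditure : List Int) (d : Int) : Prop :=
  1 ≤ d ∨ (d = 0 ∧ expenditure = [])
instance (expenditure : List Int) (d : Int) : Decidable (Pre_activityNotifications expenditure d) := by
  unfold Pre_activityNotifications; infer_instance

def pvWitness_activityNotifications : List Int × Int := ([1, 2, 3, 4, 5], 2)

def Spec_activityNotifications (expenditure : List Int) (d : Int) (out : Int) : Prop := out = activityNotifications_alt expenditure d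
instance (expenditure : List Int) (d : Int) (out : Int) : Decidable (Spec_activityNotifications expenditure d out) := by unfold Spec_activityNotifications; infer_instance

-- ===== CLAIM (what is proved, stated in full; the proofs are below) =====
def Claim_equal_activityNotifications : Prop := ∀ (expenditure : List Int) (d : Int), Dom_activityNotifications expenditure d → Pre_activityNotifications expenditure d → Spec_activityNotifications expenditure d (activityNotifications expenditure d)

-- ===== LEMMAS AND PROOFS =====

-- sorted window of length d' starting at position i
def sWin (e : List Int) (d' i : Nat) : List Int :=
  PySem.List.sorted ((e.drop i).take d') (fun x => x) false

lemma sWin_pairwise (e : List Int) (d' i : Nat) : (sWin e d' i).Pairwise (· ≤ ·) := by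
  simpa using PySem.List.sorted_pairwise ((e.drop i).take d') (fun x => x)

lemma sWin_length (e : List Int) (d' i : Nat) (h : i + d' ≤ e.length) :
    (sWin e d' i).length = d' := by
  simp [sWin, PySem.List.length_sorted]
  omega

-- inserting v at bisect_left into a sorted list sorts v into it
lemma insert_bisect_sorted (l : List Int) (hl : l.Pairwise (· ≤ ·)) (v : Int) :
    PySem.List.insert l ((PySem.List.bisectLeft l v : Nat) : Int) v
      = PySem.List.sorted (v :: l) (fun x => x) false := by
  obtain ⟨hk, hlt, hge⟩ := PySem.List.bisectLeft_spec l v hl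
  rw [PySem.List.insert_natCast l (PySem.List.bisectLeft l v) v hk]
  set k := PySem.List.bisectLeft l v with hkdef
  have hperm : (l.take k ++ v :: l.drop k).Perm (v :: l) := by
    have h1 : (l.take k ++ v :: l.drop k).Perm (v :: (l.take k ++ l.drop k)) := List.perm_middle
    rwa [List.take_append_drop] at h1
  have hmem_take : ∀ a ∈ l.take k, a < v := by
    intro a ha
    obtain ⟨j, hj, rfl⟩ := List.mem_iff_getElem.mp ha
    have hjk : j < k := lt_of_lt_of_le hj (by simp [List.length_take])
    have hjl : j < l.length := lt_of_lt_of_le hj (by simp)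
    have := hlt j hjl hjk
    simpa [List.getElem_take] using this
  have hmem_drop : ∀ b ∈ l.drop k, v ≤ b := by
    intro b hb
    obtain ⟨j, hj, rfl⟩ := List.mem_iff_getElem.mp hb
    have hjl : k + j < l.length := by
      have := hj; simp [List.length_drop] at this; omega
    have := hge (k + j) hjl (Nat.le_add_right _ _)
    simpa [List.getElem_drop] using this
  have hpw : (l.take k ++ v :: l.drop k).Pairwise (· ≤ ·) := by
    rw [List.pairwise_append]
    refine ⟨hl.sublist (List.take_sublist _ _), ?_, ?_⟩
    · rw [List.pairwise_cons]
      exact ⟨hmem_drop, hl.sublist (List.drop_sublist _ _)⟩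
    · intro a ha b hb
      rcases List.mem_cons.mp hb with rfl | hb
      · exact le_of_lt (hmem_take a ha)
      · exact le_trans (le_of_lt (hmem_take a ha)) (hmem_drop b hb)
  exact (PySem.List.sorted_id_eq_of_perm_of_pairwise _ _ hperm hpw).symm

-- one step of A's maintenance: remove the outgoing element, insert the incoming one
lemma checklist_step (e : List Int) (d' i : Nat) (h1 : 1 ≤ d') (hn : d' + i < e.length) :
    ∃ cl, PySem.List.remove? (sWin e d' i) (e[i]'(by omega)) = some cl ∧
      PySem.List.insert cl ((PySem.List.bisectLeft cl (e[d' + i]'hn) : Nat) : Int) (e[d' + i]'hn)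
        = sWin e d' (i + 1) := by
  have hi : i < e.length := by omega
  set t : List Int := (e.drop (i + 1)).take (d' - 1) with htdef
  have hwin : (e.drop i).take d' = e[i] :: t := by
    rw [List.drop_eq_getElem_cons hi]
    have : d' = (d' - 1) + 1 := by omega
    rw [this, List.take_succ_cons]
  have hmem : e[i] ∈ sWin e d' i := by
    rw [sWin, PySem.List.mem_sorted, hwin]; exact List.mem_cons_self
  refine ⟨(sWin e d' i).erase e[i], PySem.List.remove?_eq_some_erase _ _ hmem, ?_⟩
  have hclpw : ((sWin e d' i).erase e[i]).Pairwise (· ≤ ·) :=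
    (sWin_pairwise e d' i).sublist (List.erase_sublist ..)
  have hclperm : ((sWin e d' i).erase e[i]).Perm t := by
    have h1 : (sWin e d' i).Perm ((e.drop i).take d') := PySem.List.sorted_perm _ _ _
    have h2 := h1.erase e[i]
    rwa [hwin, List.erase_cons_head] at h2
  rw [insert_bisect_sorted _ hclpw]
  have hwin' : (e.drop (i + 1)).take d' = t ++ [e[d' + i]] := by
    have hm : d' - 1 < (e.drop (i + 1)).length := by simp [List.length_drop]; omega
    have hd : d' = (d' - 1) + 1 := by omega
    conv_lhs => rw [hd, List.take_add_one]
    rw [htdef]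
    congr 1
    have hidx : i + 1 + (d' - 1) = d' + i := by omega
    have : (e.drop (i + 1))[d' - 1]? = some e[d' + i] := by
      rw [List.getElem?_drop, hidx, List.getElem?_eq_getElem (by omega)]
    simp [this]
  have hperm : (e[d' + i] :: (sWin e d' i).erase e[i]).Perm ((e.drop (i + 1)).take d') := by
    rw [hwin']
    exact ((hclperm.cons _).trans (List.perm_append_singleton _ _).symm)
  exact PySem.List.sorted_eq_sorted_of_perm _ _ _ (fun a b h => h) hperm

lemma cast_sub_self (d' i : Nat) : (d' : Int) + (i : Int) - (d' : Int) = ((i : Nat) : Int) := by ring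

lemma slice_win (e : List Int) (d' i : Nat) :
    PySem.List.slice e (some ((d' : Int) + (i : Int) - (d' : Int))) (some ((d' : Int) + (i : Int)))
      = (e.drop i).take d' := by
  rw [cast_sub_self, show (d' : Int) + (i : Int) = ((d' + i : Nat) : Int) from by push_cast; ring,
      PySem.List.slice_natCast]
  congr 1
  omega

lemma getD_at (e : List Int) (d' i : Nat) (hn : d' + i < e.length) :
    PySem.List.pyGetD e ((d' : Int) + (i : Int)) 0 = e[d' + i]'hn := by
  rw [show (d' : Int) + (i : Int) = ((d' + i : Nat) : Int) from by push_cast; ring,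
      PySem.List.pyGetD_natCast, List.getD_eq_getElem e 0 hn]

lemma stepEven_eq (e : List Int) (d' i : Nat) (h1 : 1 ≤ d')
    (heven : PySem.Int.mod (d' : Int) 2 = 0) (hn : d' + i < e.length) (c : Int) :
    aStepEven e (d' : Int) (c, sWin e d' i) ((i : Int), e[d' + i]'hn)
      = some (altBody e (d' : Int) c ((d' : Int) + (i : Int)), sWin e d' (i + 1)) := by
  obtain ⟨cl, hrem, hins⟩ := checklist_step e d' i h1 hn
  have hget : PySem.List.pyGet? e (i : Int) = some (e[i]'(by omega)) := by
    rw [PySem.List.pyGet?_natCast, List.getElem?_eq_getElem (by omega)]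
  unfold aStepEven altBody
  rw [hget]
  simp only [Option.bind_some, hrem, Option.map_some, hins]
  rw [slice_win, getD_at e d' i hn]
  have hdvd : (2 : Int) ∣ (d' : Int) := (PySem.Int.mod_eq_zero_iff_dvd _ _).mp heven
  simp [sWin, hdvd]

lemma stepOdd_eq (e : List Int) (d' i : Nat) (h1 : 1 ≤ d') (hodd : ¬ PySem.Int.mod (d' : Int) 2 = 0)
    (hn : d' + i < e.length) (c : Int) :
    aStepOdd e (d' : Int) (c, sWin e d' i) ((i : Int), e[d' + i]'hn)
      = some (altBody e (d' : Int) c ((d' : Int) + (i : Int)), sWin e d' (i + 1)) := by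
  obtain ⟨cl, hrem, hins⟩ := checklist_step e d' i h1 hn
  have hget : PySem.List.pyGet? e (i : Int) = some (e[i]'(by omega)) := by
    rw [PySem.List.pyGet?_natCast, List.getElem?_eq_getElem (by omega)]
  have hlen : (sWin e d' i).length = d' := sWin_length e d' i (by omega)
  have hmid : PySem.List.pyGet? (sWin e d' i) (PySem.Int.floordiv (d' : Int) 2)
      = some ((sWin e d' i)[d' / 2]'(by omega)) := by
    rw [show PySem.Int.floordiv (d' : Int) 2 = ((d' / 2 : Nat) : Int) from
          PySem.Int.floordiv_natCast d' 2,
        PySem.List.pyGet?_natCast, List.getElem?_eq_getElem (by omega)]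
  unfold aStepOdd altBody
  rw [hmid]
  simp only [Option.bind_some, hget, hrem, Option.map_some, hins]
  rw [slice_win, getD_at e d' i hn]
  have hndvd : ¬ (2 : Int) ∣ (d' : Int) := fun h => hodd ((PySem.Int.mod_eq_zero_iff_dvd _ _).mpr h)
  have hmidD' : PySem.List.pyGetD (PySem.List.sorted ((e.drop i).take d') (fun x => x) false)
      ((d' : Int) / 2) 0
      = (PySem.List.sorted ((e.drop i).take d') (fun x => x) false)[d' / 2]'(by
          have := hlen; simp only [sWin] at this; omega) := by
    rw [show (d' : Int) / 2 = ((d' / 2 : Nat) : Int) from by exact_mod_cast rfl,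
        PySem.List.pyGetD_natCast, List.getD_eq_getElem _ 0 (by
          have := hlen; simp only [sWin] at this; omega)]
  simp [sWin, hndvd, hmidD', mul_comm]

lemma pyRange_one_nil (a b : Int) (h : b ≤ a) : PySem.List.pyRange a b 1 = [] := by
  simp [PySem.List.pyRange]; omega

lemma loop_eq_general (e : List Int) (d' : Nat)
    (step : Int × List Int → Int × Int → Option (Int × List Int))
    (hstep : ∀ (i : Nat) (hn : d' + i < e.length) (c : Int),
      step (c, sWin e d' i) ((i : Int), e[d' + i]'hn)
        = some (altBody e (d' : Int) c ((d' : Int) + (i : Int)), sWin e d' (i + 1))) :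
    ∀ (m i : Nat) (c : Int), d' + i + m = e.length →
    ∃ cl, (PySem.List.enumerate (e.drop (d' + i)) (i : Int)).foldl
        (fun st p => st.bind (fun s => step s p)) (some (c, sWin e d' i))
      = some ((PySem.List.pyRange ((d' : Int) + (i : Int)) (e.length : Int) 1).foldl
          (altBody e (d' : Int)) c, cl) := by
  intro m
  induction m with
  | zero =>
    intro i c hm
    have hdrop : e.drop (d' + i) = [] := List.drop_eq_nil_iff.mpr (by omega)
    have hrange : PySem.List.pyRange ((d' : Int) + (i : Int)) (e.length : Int) 1 = [] :=
      pyRange_one_nil _ _ (by omega)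
    exact ⟨sWin e d' i, by rw [hdrop, hrange, PySem.List.enumerate_nil]; rfl⟩
  | succ m ih =>
    intro i c hm
    have hn : d' + i < e.length := by omega
    have hdrop : e.drop (d' + i) = e[d' + i] :: e.drop (d' + i + 1) := List.drop_eq_getElem_cons hn
    rw [hdrop, PySem.List.enumerate_cons, List.foldl_cons]
    simp only [Option.bind_some]
    rw [hstep i hn c]
    obtain ⟨cl, hcl⟩ := ih (i + 1) (altBody e (d' : Int) c ((d' : Int) + (i : Int))) (by omega)
    refine ⟨cl, ?_⟩
    rw [PySem.List.pyRange_one_cons (show (d' : Int) + (i : Int) < (e.length : Int) from by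
      exact_mod_cast hn), List.foldl_cons]
    have e1 : ((i + 1 : Nat) : Int) = (i : Int) + 1 := by push_cast; ring
    have e2 : d' + (i + 1) = d' + i + 1 := by omega
    rw [e2, e1, ← add_assoc] at hcl
    exact hcl

lemma loopEven_eq (e : List Int) (d' : Nat) (h1 : 1 ≤ d')
    (heven : PySem.Int.mod (d' : Int) 2 = 0) :
    ∀ (m i : Nat) (c : Int), d' + i + m = e.length →
    ∃ cl, (PySem.List.enumerate (e.drop (d' + i)) (i : Int)).foldl
        (fun st p => st.bind (fun s => aStepEven e (d' : Int) s p)) (some (c, sWin e d' i))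
      = some ((PySem.List.pyRange ((d' : Int) + (i : Int)) (e.length : Int) 1).foldl
          (altBody e (d' : Int)) c, cl) :=
  loop_eq_general e d' (aStepEven e (d' : Int))
    (fun i hn c => stepEven_eq e d' i h1 heven hn c)

lemma loopOdd_eq (e : List Int) (d' : Nat) (h1 : 1 ≤ d') (hodd : ¬ PySem.Int.mod (d' : Int) 2 = 0) :
    ∀ (m i : Nat) (c : Int), d' + i + m = e.length →
    ∃ cl, (PySem.List.enumerate (e.drop (d' + i)) (i : Int)).foldl
        (fun st p => st.bind (fun s => aStepOdd e (d' : Int) s p)) (some (c, sWin e d' i))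
      = some ((PySem.List.pyRange ((d' : Int) + (i : Int)) (e.length : Int) 1).foldl
          (altBody e (d' : Int)) c, cl) :=
  loop_eq_general e d' (aStepOdd e (d' : Int))
    (fun i hn c => stepOdd_eq e d' i h1 hodd hn c)

-- ===== VERDICT (by name: the statement is the Claim_ definition above) =====
theorem activityNotifications_spec : Claim_equal_activityNotifications := by
  intro e d _ hpre
  unfold Spec_activityNotifications
  rcases hpre with hd1 | ⟨hd0, he⟩
  · obtain ⟨d', rfl⟩ : ∃ d' : Nat, d = (d' : Int) :=
      ⟨d.toNat, (Int.toNat_of_nonneg (by omega)).symm⟩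
    have h1 : 1 ≤ d' := by exact_mod_cast hd1
    simp only [activityNotifications, activityNotifications_alt]
    have hcheck : PySem.List.sorted (PySem.List.slice e none (some (d' : Int))) (fun x => x) false
        = sWin e d' 0 := by
      rw [PySem.List.slice_to e (Int.natCast_nonneg _)]
      simp [sWin]
    have htail : PySem.List.slice e (some (d' : Int)) none = e.drop d' := by
      rw [PySem.List.slice_from e (Int.natCast_nonneg _)]
      simp
    rw [hcheck, htail]
    by_cases hlen : e.length ≤ d'
    · have hd : e.drop d' = [] := List.drop_eq_nil_iff.mpr hlen
      have hr : PySem.List.pyRange (d' : Int) (e.length : Int) 1 = [] :=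
        pyRange_one_nil _ _ (by exact_mod_cast hlen)
      rw [hd, hr]
      split_ifs <;> rfl
    · by_cases hpar : PySem.Int.mod (d' : Int) 2 = 0
      · obtain ⟨cl, hcl⟩ := loopEven_eq e d' h1 hpar (e.length - d') 0 0 (by omega)
        simp only [Nat.cast_zero, add_zero] at hcl
        rw [if_pos hpar, hcl]
      · obtain ⟨cl, hcl⟩ := loopOdd_eq e d' h1 hpar (e.length - d') 0 0 (by omega)
        simp only [Nat.cast_zero, add_zero] at hcl
        rw [if_neg hpar, hcl]
  · subst hd0
    subst he
    rfl
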